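-- pv_equiv track=rewrite | github.com/brillandthomas/Traffic-Light-Modelling-Optimization | Old-Version/Fonctions-auxiliaires.py | supprime_phase
-- ===== SOURCE A (Python) =====
-- def apparait2fois(plan,i):
--     P = len(plan[0])
--     ok = 0
--     k = 0
--     while ok < 2 and k < P:
--         if plan[0][k][0][i] == 1:
--             ok += 1
--         k += 1
--     return(ok >= 2)
--
-- def supprime_phase(plan,k):
--     n = len(plan[0][k][0])
--     ok = True
--     i = 0
--     while i < n and ok:
--         if plan[0][k][0][i] == 1:
--             ok = apparait2fois(plan,i)
--         i += 1
--     if ok: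
--         nouveau_plan = list(plan[0])
--         dt = nouveau_plan.pop(k)[1]
--         if k == n:
--             nouveau_plan[0] = (nouveau_plan[0][0],nouveau_plan[0][1] + dt)
--         else:
--             nouveau_plan[k-1] = (nouveau_plan[k-1][0],nouveau_plan[k-1][1] + dt)
--         return(nouveau_plan,plan[1])
--     else:
--         return(plan)
-- ===== SOURCE B (Python) =====
-- def supprime_phase(plan, k):
--     phases = plan[0]
--     # one pass over every phase: counts[i] = number of phases whose vector has a 1 at index i
--     counts = {}
--     for ph in phases:
--         for i, v in enumerate(ph[0]):
--             if v == 1: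
--                 counts[i] = counts.get(i, 0) + 1
--     row = phases[k][0]
--     ok = all(counts.get(i, 0) >= 2 for i, v in enumerate(row) if v == 1)
--     if ok:
--         nouveau_plan = list(phases)
--         dt = nouveau_plan.pop(k)[1]
--         j = 0 if k == len(row) else k - 1
--         nouveau_plan[j] = (nouveau_plan[j][0], nouveau_plan[j][1] + dt)
--         return (nouveau_plan, plan[1])
--     return plan
-- ===== Notes on version B (the rewrite author's own statement) =====
-- stated objective: faster
-- what changed: Replaces the per-index rescans of all phases (apparait2fois called for every 1-entry of phase k) by a single counting pass over all phases building a dict counts[i] = number of phases with a 1 at index i, then one table lookup per 1-entry of phase k; the removal/merge step is unified into one indexed assignment.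
import Mathlib
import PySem

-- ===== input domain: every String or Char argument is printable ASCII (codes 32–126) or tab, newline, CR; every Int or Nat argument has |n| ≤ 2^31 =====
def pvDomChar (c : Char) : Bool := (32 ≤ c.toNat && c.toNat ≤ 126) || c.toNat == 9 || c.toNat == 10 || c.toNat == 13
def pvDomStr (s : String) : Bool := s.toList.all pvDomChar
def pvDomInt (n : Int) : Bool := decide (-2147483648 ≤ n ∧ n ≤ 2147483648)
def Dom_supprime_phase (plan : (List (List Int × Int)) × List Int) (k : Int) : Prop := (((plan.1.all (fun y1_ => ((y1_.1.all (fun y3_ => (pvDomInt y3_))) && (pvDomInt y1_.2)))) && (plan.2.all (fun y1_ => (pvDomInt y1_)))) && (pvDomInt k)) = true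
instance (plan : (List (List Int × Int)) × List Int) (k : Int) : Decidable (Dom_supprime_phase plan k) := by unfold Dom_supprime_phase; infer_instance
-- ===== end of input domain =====

-- B replaces A's repeated per-index rescans of all phases (apparait2fois) by one counting
-- pass building a dict counts[i] = number of phases with a 1 at index i (objective: faster
-- constant factors / no repeated rescans); return values proved equal wherever Python A returns.

-- ===== PORT A =====
-- while ok < 2 and k < P: fuel = P - k
def apparait2foisGo (phases : List (List Int × Int)) (i : Int) : Nat → Nat → Nat → Nat
  | 0, ok, _k => ok
  | fuel+1, ok, k =>
    if ok < 2 then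
      apparait2foisGo phases i fuel
        (if PySem.List.pyGetD (PySem.List.pyGetD phases (k : Int) ([], 0)).1 i 0 = 1 then ok + 1 else ok)
        (k + 1)
    else ok

def apparait2fois (plan : (List (List Int × Int)) × List Int) (i : Int) : Bool :=
  decide (2 ≤ apparait2foisGo plan.1 i plan.1.length 0 0)

-- while i < n and ok: fuel = n - i
def supLoop (plan : (List (List Int × Int)) × List Int) (row : List Int) : Nat → Nat → Bool → Bool
  | 0, _i, ok => ok
  | fuel+1, i, ok =>
    if ok then
      supLoop plan row fuel (i+1)
        (if PySem.List.pyGetD row (i : Int) 0 = 1 then apparait2fois plan (i : Int) else ok)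
    else ok

def supprime_phase (plan : (List (List Int × Int)) × List Int) (k : Int) : (List (List Int × Int)) × List Int :=
  let row := (PySem.List.pyGetD plan.1 k ([], 0)).1
  let n := row.length
  let ok := supLoop plan row n 0 true
  if ok then
    match PySem.List.pop? plan.1 k with
    | none => plan   -- Python raises here; excluded by Pre_
    | some (popped, nouveau) =>
      let dt := popped.2
      if k = (n : Int) then
        (PySem.List.pySetD nouveau 0
          ((PySem.List.pyGetD nouveau 0 ([], 0)).1, (PySem.List.pyGetD nouveau 0 ([], 0)).2 + dt), plan.2)
      else
        (PySem.List.pySetD nouveau (k-1)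
          ((PySem.List.pyGetD nouveau (k-1) ([], 0)).1, (PySem.List.pyGetD nouveau (k-1) ([], 0)).2 + dt), plan.2)
  else plan

-- ===== PORT B =====
def countsOf (phases : List (List Int × Int)) : PySem.Dict Int Int :=
  phases.foldl (fun d ph =>
    (PySem.List.enumerate ph.1 0).foldl
      (fun d p => if p.2 = 1 then d.insert p.1 (d.getD p.1 0 + 1) else d) d)
    PySem.Dict.empty

def supprime_phase_alt (plan : (List (List Int × Int)) × List Int) (k : Int) : (List (List Int × Int)) × List Int :=
  let phases := plan.1
  let counts := countsOf phases
  let row := (PySem.List.pyGetD phases k ([], 0)).1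
  let ok := (PySem.List.enumerate row 0).all
      (fun p => !(p.2 == 1) || decide (2 ≤ counts.getD p.1 0))
  if ok then
    match PySem.List.pop? phases k with
    | none => plan   -- Python raises here; excluded by Pre_
    | some (popped, nouveau) =>
      let dt := popped.2
      let j : Int := if k = (row.length : Int) then 0 else k - 1
      (PySem.List.pySetD nouveau j
        ((PySem.List.pyGetD nouveau j ([], 0)).1, (PySem.List.pyGetD nouveau j ([], 0)).2 + dt), plan.2)
  else plan

-- ===== PRECONDITION & SPEC =====
-- number of phases whose vector carries a 1 at index j (out-of-range reads count as 0)
def cntOne (phases : List (List Int × Int)) (j : Nat) : Nat :=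
  phases.countP (fun ph => ph.1.getD j 0 == 1)

-- Pre_ holds exactly where Python A returns: k in range of the phase list; apparait2fois never
-- indexes past the end of a shorter phase vector before its running count reaches 2; and when
-- the deletion fires, the merge index is in range of the shortened list.
def Pre_supprime_phase (plan : (List (List Int × Int)) × List Int) (k : Int) : Prop :=
  (decide (-(plan.1.length : Int) ≤ k ∧ k < (plan.1.length : Int)) &&
   (List.range (PySem.List.pyGetD plan.1 k ([], 0)).1.length).all (fun j =>
      !((PySem.List.pyGetD plan.1 k ([], 0)).1.getD j 0 == 1)
      || !((List.range j).all (fun j' =>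
             !((PySem.List.pyGetD plan.1 k ([], 0)).1.getD j' 0 == 1)
             || decide (2 ≤ cntOne plan.1 j')))
      || (List.range plan.1.length).all (fun m =>
            !(decide ((plan.1.take m).countP (fun ph => ph.1.getD j 0 == 1) < 2))
            || decide (j < (plan.1.getD m ([], 0)).1.length))) &&
   (!((List.range (PySem.List.pyGetD plan.1 k ([], 0)).1.length).all (fun j =>
        !((PySem.List.pyGetD plan.1 k ([], 0)).1.getD j 0 == 1)
        || decide (2 ≤ cntOne plan.1 j)))
    || (if k = ((PySem.List.pyGetD plan.1 k ([], 0)).1.length : Int)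
        then decide (2 ≤ plan.1.length)
        else decide (-((plan.1.length : Int) - 1) ≤ k - 1 ∧ k - 1 < (plan.1.length : Int) - 1)))) = true

instance (plan : (List (List Int × Int)) × List Int) (k : Int) : Decidable (Pre_supprime_phase plan k) := by
  unfold Pre_supprime_phase; infer_instance

def pvWitness_supprime_phase : ((List (List Int × Int)) × List Int) × Int :=
  ((([([1], 5), ([1], 7)], [3]) : (List (List Int × Int)) × List Int), 0)

def Spec_supprime_phase (plan : (List (List Int × Int)) × List Int) (k : Int)
    (out : (List (List Int × Int)) × List Int) : Prop :=
  out = supprime_phase_alt plan k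

instance (plan : (List (List Int × Int)) × List Int) (k : Int) (out : (List (List Int × Int)) × List Int) :
    Decidable (Spec_supprime_phase plan k out) := by unfold Spec_supprime_phase; infer_instance

-- ===== CLAIM =====
def Claim_equal_supprime_phase : Prop :=
  ∀ (plan : (List (List Int × Int)) × List Int) (k : Int),
    Dom_supprime_phase plan k → Pre_supprime_phase plan k →
    Spec_supprime_phase plan k (supprime_phase plan k)

-- ===== LEMMAS AND PROOFS =====

theorem app2go_spec (phases : List (List Int × Int)) (j : Nat) :
    ∀ (fuel k ok : Nat), ok ≤ 2 → fuel + k = phases.length →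
      apparait2foisGo phases (j : Int) fuel ok k
        = min 2 (ok + (phases.drop k).countP (fun ph => ph.1.getD j 0 == 1)) := by
  intro fuel
  induction fuel with
  | zero =>
    intro k ok hok hk
    have : k = phases.length := by omega
    subst this
    simp [apparait2foisGo, List.drop_length]
    omega
  | succ fuel ih =>
    intro k ok hok hk
    have hk' : k < phases.length := by omega
    have hdrop : phases.drop k = phases[k] :: phases.drop (k+1) :=
      (List.getElem_cons_drop hk').symm
    rw [apparait2foisGo]
    by_cases h2 : ok < 2
    · rw [if_pos h2]
      have hget : PySem.List.pyGetD phases (k : Int) ([], 0) = phases[k] := by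
        simp [PySem.List.pyGetD_natCast, List.getD_eq_getElem?_getD, List.getElem?_eq_getElem hk']
      rw [hget]
      have hgd : (phases[k].1.getD j 0 : Int) = PySem.List.pyGetD phases[k].1 (j : Int) 0 := by
        simp [PySem.List.pyGetD_natCast]
      rw [hdrop, List.countP_cons]
      by_cases hv : PySem.List.pyGetD phases[k].1 (j : Int) 0 = 1
      · rw [if_pos hv, ih (k+1) (ok+1) (by omega) (by omega)]
        have : (phases[k].1.getD j 0 == 1) = true := by
          rw [beq_iff_eq, ← hv, hgd]
        simp only [this, if_true]
        omega
      · rw [if_neg hv, ih (k+1) ok hok (by omega)]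
        have : (phases[k].1.getD j 0 == 1) = false := by
          rw [beq_eq_false_iff_ne]
          intro hc
          exact hv (by rw [← hgd]; exact hc)
        simp only [this, Bool.false_eq_true, if_false]
        omega
    · rw [if_neg h2]
      omega

theorem app2_spec (plan : (List (List Int × Int)) × List Int) (j : Nat) :
    apparait2fois plan (j : Int) = decide (2 ≤ cntOne plan.1 j) := by
  unfold apparait2fois cntOne
  rw [app2go_spec plan.1 j plan.1.length 0 0 (by omega) (by omega)]
  simp only [List.drop_zero, Nat.zero_add]
  rw [decide_eq_decide]
  omega

theorem supLoop_false (plan : (List (List Int × Int)) × List Int) (row : List Int) :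
    ∀ fuel i, supLoop plan row fuel i false = false := by
  intro fuel i
  cases fuel with
  | zero => rfl
  | succ fuel => rw [supLoop, if_neg (by simp)]

theorem supLoop_spec (plan : (List (List Int × Int)) × List Int) (row : List Int) :
    ∀ (fuel i : Nat),
      supLoop plan row fuel i true
        = decide (∀ j, i ≤ j → j < i + fuel → row.getD j 0 = 1 → 2 ≤ cntOne plan.1 j) := by
  intro fuel
  induction fuel with
  | zero =>
    intro i
    rw [supLoop]
    symm
    rw [decide_eq_true_iff]
    intro j h1 h2
    omega
  | succ fuel ih =>
    intro i
    rw [supLoop, if_pos rfl]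
    have hrow : PySem.List.pyGetD row (i : Int) 0 = row.getD i 0 := by
      simp [PySem.List.pyGetD_natCast]
    by_cases hv : row.getD i 0 = 1
    · rw [if_pos (by rw [hrow]; exact hv), app2_spec]
      by_cases hc : 2 ≤ cntOne plan.1 i
      · rw [decide_eq_true hc, ih]
        rw [decide_eq_decide]
        constructor
        · intro h j h1 h2 h3
          rcases Nat.eq_or_lt_of_le h1 with he | hlt
          · rw [← he]; exact hc
          · exact h j hlt (by omega) h3
        · intro h j h1 h2 h3
          exact h j (by omega) (by omega) h3
      · rw [decide_eq_false hc, supLoop_false]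
        symm
        rw [decide_eq_false_iff_not]
        intro h
        exact hc (h i (by omega) (by omega) hv)
    · rw [if_neg (by rw [hrow]; exact hv), ih]
      rw [decide_eq_decide]
      constructor
      · intro h j h1 h2 h3
        rcases Nat.eq_or_lt_of_le h1 with he | hlt
        · exact absurd (he ▸ h3) hv
        · exact h j hlt (by omega) h3
      · intro h j h1 h2 h3
        exact h j (by omega) (by omega) h3

theorem inner_getD (row : List Int) :
    ∀ (s : Int) (d : PySem.Dict Int Int) (i : Int),
      ((PySem.List.enumerate row s).foldl
        (fun d p => if p.2 = 1 then d.insert p.1 (d.getD p.1 0 + 1) else d) d).getD i 0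
      = d.getD i 0
        + (if 0 ≤ i - s ∧ (i - s).toNat < row.length ∧ row.getD (i - s).toNat 0 = 1 then 1 else 0) := by
  induction row with
  | nil =>
    intro s d i
    simp [PySem.List.enumerate_nil]
  | cons x xs ih =>
    intro s d i
    rw [PySem.List.enumerate_cons, List.foldl_cons, ih]
    dsimp only
    by_cases his : i = s
    · subst his
      have hno : ¬(0 ≤ i - (i+1) ∧ (i - (i+1)).toNat < xs.length ∧ xs.getD (i - (i+1)).toNat 0 = 1) :=
        fun h => absurd h.1 (by omega)
      by_cases hx : x = 1
      · rw [if_pos hx, PySem.Dict.getD_insert_self, if_neg hno]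
        simp only [sub_self, Int.toNat_zero, List.getD_cons_zero, List.length_cons]
        rw [if_pos ⟨le_refl (0:Int), Nat.succ_pos _, hx⟩]
        omega
      · rw [if_neg hx, if_neg hno]
        simp only [sub_self, Int.toNat_zero, List.getD_cons_zero, List.length_cons]
        rw [if_neg (fun h => hx h.2.2)]
    · have hd : (if x = 1 then d.insert s (d.getD s 0 + 1) else d).getD i 0 = d.getD i 0 := by
        by_cases hx : x = 1
        · rw [if_pos hx, PySem.Dict.getD_insert_of_ne _ _ _ his]
        · rw [if_neg hx]
      rw [hd]
      by_cases hge : 0 ≤ i - (s+1)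
      · have hm : (i - s).toNat = (i - (s+1)).toNat + 1 := by omega
        by_cases h2 : (i - (s+1)).toNat < xs.length ∧ xs.getD (i - (s+1)).toNat 0 = 1
        · rw [if_pos ⟨hge, h2.1, h2.2⟩,
            if_pos ⟨by omega, by rw [hm, List.length_cons]; omega,
                    by rw [hm, List.getD_cons_succ]; exact h2.2⟩]
        · rw [if_neg (fun h => h2 ⟨h.2.1, h.2.2⟩),
            if_neg (fun h => h2 ⟨by have := h.2.1; rw [hm, List.length_cons] at this; omega, by
              have := h.2.2; rw [hm, List.getD_cons_succ] at this; exact this⟩)]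
      · rw [if_neg (fun h => hge (by omega)), if_neg (fun h => absurd h.1 (by omega))]

theorem countsOf_getD (phases : List (List Int × Int)) (j : Nat) :
    ∀ (d : PySem.Dict Int Int),
      (phases.foldl (fun d ph =>
          (PySem.List.enumerate ph.1 0).foldl
            (fun d p => if p.2 = 1 then d.insert p.1 (d.getD p.1 0 + 1) else d) d) d).getD (j : Int) 0
        = d.getD (j : Int) 0 + (cntOne phases j : Int) := by
  induction phases with
  | nil => intro d; simp [cntOne]
  | cons ph rest ih =>
    intro d
    rw [List.foldl_cons, ih, inner_getD]
    unfold cntOne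
    rw [List.countP_cons]
    simp only [sub_zero, Int.toNat_natCast]
    by_cases h1 : ph.1.getD j 0 = 1
    · have hlen : j < ph.1.length := by
        by_contra hc
        rw [List.getD_eq_default _ _ (by omega)] at h1
        exact absurd h1 (by norm_num)
      rw [if_pos ⟨by omega, hlen, h1⟩]
      have : (ph.1.getD j 0 == 1) = true := beq_iff_eq.mpr h1
      simp only [this, if_true]
      push_cast
      ring
    · rw [if_neg (fun h => h1 h.2.2)]
      have : (ph.1.getD j 0 == 1) = false := beq_eq_false_iff_ne.mpr h1
      simp only [this, Bool.false_eq_true, if_false]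
      push_cast
      ring

theorem okB_spec (phases : List (List Int × Int)) (row : List Int) :
    ((PySem.List.enumerate row 0).all
        (fun p => !(p.2 == 1) || decide (2 ≤ (countsOf phases).getD p.1 0)))
      = decide (∀ j, j < row.length → row.getD j 0 = 1 → 2 ≤ cntOne phases j) := by
  have hc : ∀ j : Nat, (countsOf phases).getD (j : Int) 0 = (cntOne phases j : Int) := by
    intro j
    unfold countsOf
    rw [countsOf_getD, PySem.Dict.getD_empty]
    omega
  rw [Bool.eq_iff_iff, List.all_eq_true, decide_eq_true_eq]
  constructor
  · intro h j h1 h2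
    have hm : ((0 : Int) + (j : Int), row[j]) ∈ PySem.List.enumerate row 0 :=
      (PySem.List.mem_enumerate_iff _ _ _).mpr ⟨j, h1, rfl⟩
    have := h _ hm
    rw [Bool.or_eq_true, Bool.not_eq_true', beq_eq_false_iff_ne, decide_eq_true_eq] at this
    rcases this with hne | hle
    · exact absurd (by rw [List.getD_eq_getElem _ _ h1] at h2; exact h2) hne
    · rw [zero_add, hc j] at hle
      omega
  · intro h p hp
    rcases (PySem.List.mem_enumerate_iff _ _ _).mp hp with ⟨j, hj, rfl⟩
    rw [Bool.or_eq_true, Bool.not_eq_true', beq_eq_false_iff_ne, decide_eq_true_eq]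
    by_cases hv : row[j] = (1 : Int)
    · right
      rw [zero_add, hc j]
      have := h j hj (by rw [List.getD_eq_getElem _ _ hj]; exact hv)
      omega
    · left
      exact hv

-- ===== VERDICT =====
theorem supprime_phase_spec : Claim_equal_supprime_phase := by
  unfold Claim_equal_supprime_phase
  intro plan k _dom _pre
  unfold Spec_supprime_phase supprime_phase supprime_phase_alt
  dsimp only
  have hok : ∀ row : List Int, supLoop plan row row.length 0 true
      = (PySem.List.enumerate row 0).all
          (fun p => !(p.2 == 1) || decide (2 ≤ (countsOf plan.1).getD p.1 0)) := by
    intro row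
    rw [supLoop_spec, okB_spec, decide_eq_decide]
    constructor
    · intro h j h1 h2
      exact h j (by omega) (by omega) h2
    · intro h j _ h2 h3
      exact h j (by omega) h3
  rw [hok]
  by_cases hb : ((PySem.List.enumerate (PySem.List.pyGetD plan.1 k ([], 0)).1 0).all
      (fun p => !(p.2 == 1) || decide (2 ≤ (countsOf plan.1).getD p.1 0))) = true
  · rw [if_pos hb, if_pos hb]
    cases hpop : PySem.List.pop? plan.1 k with
    | none => rfl
    | some r =>
      rcases r with ⟨popped, nouveau⟩
      dsimp only
      by_cases hk : k = (((PySem.List.pyGetD plan.1 k ([], 0)).1.length : Nat) : Int)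
      · rw [if_pos hk, if_pos hk]
      · rw [if_neg hk, if_neg hk]
  · rw [if_neg hb, if_neg hb]
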